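-- pv_equiv track=rewrite | github.com/AnubhavKiroula/data-cleaning-openenv | backend/services/cleaning_service.py | _infer_agent_name
-- ===== SOURCE A (Python) =====
-- def _infer_agent_name(issues_detected: list[str]) -> str:
--     lowered = [issue.lower() for issue in issues_detected]
--     if any("missing" in issue for issue in lowered):
--         return "FillMissingAgent"
--     if any("duplicate" in issue for issue in lowered):
--         return "DuplicateDetector"
--     if any("outlier" in issue for issue in lowered):
--         return "OutlierHandler"
--     if any("category" in issue or "format" in issue for issue in lowered):
--         return "CategoryStandardizer"
--     return "SkipAgent"
-- ===== SOURCE B (Python) =====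
-- def _infer_agent_name(issues_detected: list[str]) -> str:
--     m = d = o = c = False
--     for issue in issues_detected:
--         low = issue.lower()
--         m = m or ("missing" in low)
--         d = d or ("duplicate" in low)
--         o = o or ("outlier" in low)
--         c = c or ("category" in low) or ("format" in low)
--     if m:
--         return "FillMissingAgent"
--     if d:
--         return "DuplicateDetector"
--     if o:
--         return "OutlierHandler"
--     if c:
--         return "CategoryStandardizer"
--     return "SkipAgent"
-- ===== Notes on version B (the rewrite author's own statement) =====
-- stated objective: alternative
-- what changed: Replaces A's list comprehension plus four separate short-circuiting any() scans with one single pass that lowercases each issue once and accumulates four boolean flags, followed by a priority lookup on the flags.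
import Mathlib
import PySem

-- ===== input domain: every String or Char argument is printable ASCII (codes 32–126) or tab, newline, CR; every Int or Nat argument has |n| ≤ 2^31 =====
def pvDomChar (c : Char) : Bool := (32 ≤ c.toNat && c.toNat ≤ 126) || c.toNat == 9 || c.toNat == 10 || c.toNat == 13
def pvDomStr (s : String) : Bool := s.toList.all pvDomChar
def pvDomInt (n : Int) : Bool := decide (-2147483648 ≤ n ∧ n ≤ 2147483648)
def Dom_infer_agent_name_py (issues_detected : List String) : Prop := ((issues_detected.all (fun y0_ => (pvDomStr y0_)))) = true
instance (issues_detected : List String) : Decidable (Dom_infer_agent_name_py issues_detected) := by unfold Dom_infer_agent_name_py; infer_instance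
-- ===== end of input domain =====

-- B replaces A's four separate short-circuiting any() scans over a lowered copy with one
-- single pass accumulating four boolean flags, then a priority lookup (objective: alternative).

-- ===== PORT A =====
def infer_agent_name_py (issues_detected : List String) : String :=
  let lowered := issues_detected.map PySem.Str.lower
  if lowered.any (fun issue => PySem.Str.isIn "missing" issue) then "FillMissingAgent"
  else if lowered.any (fun issue => PySem.Str.isIn "duplicate" issue) then "DuplicateDetector"
  else if lowered.any (fun issue => PySem.Str.isIn "outlier" issue) then "OutlierHandler"
  else if lowered.any (fun issue =>
      PySem.Str.isIn "category" issue || PySem.Str.isIn "format" issue) then "CategoryStandardizer"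
  else "SkipAgent"

-- ===== PORT B =====
-- one pass: fold the flag quadruple (m, d, o, c) over the issues
def inferFlagsStep (st : Bool × Bool × Bool × Bool) (issue : String) : Bool × Bool × Bool × Bool :=
  let low := PySem.Str.lower issue
  (st.1 || PySem.Str.isIn "missing" low,
   st.2.1 || PySem.Str.isIn "duplicate" low,
   st.2.2.1 || PySem.Str.isIn "outlier" low,
   st.2.2.2 || PySem.Str.isIn "category" low || PySem.Str.isIn "format" low)

def infer_agent_name_py_alt (issues_detected : List String) : String :=
  let flags := issues_detected.foldl inferFlagsStep (false, false, false, false)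
  if flags.1 then "FillMissingAgent"
  else if flags.2.1 then "DuplicateDetector"
  else if flags.2.2.1 then "OutlierHandler"
  else if flags.2.2.2 then "CategoryStandardizer"
  else "SkipAgent"

-- ===== PRECONDITION & SPEC =====
def Spec_infer_agent_name_py (issues_detected : List String) (out : String) : Prop := out = infer_agent_name_py_alt issues_detected
instance (issues_detected : List String) (out : String) : Decidable (Spec_infer_agent_name_py issues_detected out) := by unfold Spec_infer_agent_name_py; infer_instance

-- ===== CLAIM (what is proved, stated in full; the proofs are below) =====
def Claim_equal_infer_agent_name_py : Prop := ∀ (issues_detected : List String), Dom_infer_agent_name_py issues_detected → Spec_infer_agent_name_py issues_detected (infer_agent_name_py issues_detected)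

-- ===== LEMMAS AND PROOFS =====

-- The flag fold computes exactly the four membership scans over the lowered list.
theorem inferFlags_foldl (xs : List String) (a b c d : Bool) :
    xs.foldl inferFlagsStep (a, b, c, d) =
      (a || (xs.map PySem.Str.lower).any (fun i => PySem.Str.isIn "missing" i),
       b || (xs.map PySem.Str.lower).any (fun i => PySem.Str.isIn "duplicate" i),
       c || (xs.map PySem.Str.lower).any (fun i => PySem.Str.isIn "outlier" i),
       d || (xs.map PySem.Str.lower).any (fun i =>
              PySem.Str.isIn "category" i || PySem.Str.isIn "format" i)) := by
  induction xs generalizing a b c d with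
  | nil => simp
  | cons x t ih =>
    simp only [List.foldl_cons, List.map_cons, List.any_cons, inferFlagsStep, ih]
    simp [Bool.or_assoc]

-- ===== VERDICT (by name: the statement is the Claim_ definition above) =====
theorem infer_agent_name_py_spec : Claim_equal_infer_agent_name_py := by
  intro xs _
  unfold Spec_infer_agent_name_py infer_agent_name_py infer_agent_name_py_alt
  rw [inferFlags_foldl]
  simp
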